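-- pv_equiv track=rewrite | github.com/orangehn/atg | atg-coding/gen_atg/utils/utils.py | is_same_str
-- ===== SOURCE A (Python) =====
-- def is_same_str(record_asts):
--     assert len(record_asts) > 0
--     if len(record_asts) == 1:
--         return True
--     ast_str = str(record_asts[0])
--     for ast in record_asts[1:]:
--         if ast_str != str(ast):
--             return False
--     return True
-- ===== SOURCE B (Python) =====
-- def is_same_str(record_asts):
--     assert len(record_asts) > 0
--     return len(set(str(a) for a in record_asts)) == 1
-- ===== Notes on version B (the rewrite author's own statement) =====
-- stated objective: idiomatic
-- what changed: Replaces the pinned-reference compare loop with building the set of all string forms and testing that its cardinality is 1.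
import Mathlib
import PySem

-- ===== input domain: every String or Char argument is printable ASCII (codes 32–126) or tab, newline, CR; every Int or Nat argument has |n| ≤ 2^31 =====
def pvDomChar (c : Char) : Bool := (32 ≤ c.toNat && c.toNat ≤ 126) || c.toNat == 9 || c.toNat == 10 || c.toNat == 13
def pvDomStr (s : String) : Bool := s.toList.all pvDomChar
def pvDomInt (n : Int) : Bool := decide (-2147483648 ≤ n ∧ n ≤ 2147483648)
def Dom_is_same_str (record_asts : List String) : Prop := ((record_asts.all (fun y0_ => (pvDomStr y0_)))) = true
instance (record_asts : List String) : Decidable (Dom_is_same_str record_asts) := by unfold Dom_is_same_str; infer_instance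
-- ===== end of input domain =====

-- B replaces A's reference-and-compare loop with a set of all string forms, testing its cardinality (idiomatic; same cost).

-- ===== PORT A =====
-- the for-loop over record_asts[1:] with early 'return False'
def isSameStrLoop (ast_str : String) : List String → Bool
  | [] => true
  | ast :: rest => if ast_str != ast then false else isSameStrLoop ast_str rest

def is_same_str (record_asts : List String) : Bool :=
  if record_asts.length == 1 then true
  else
    match record_asts with
    | [] => false  -- unreachable: the assert raises here, excluded by Pre_
    | h :: t => isSameStrLoop h t

-- ===== PORT B =====
def is_same_str_alt (record_asts : List String) : Bool :=
  PySem.Set.len (PySem.Set.ofList (record_asts.map (fun a => a))) == 1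

-- ===== PRECONDITION & SPEC =====
-- A's 'assert len(record_asts) > 0' raises AssertionError on the empty list; Pre_ excludes exactly that.
def Pre_is_same_str (record_asts : List String) : Prop := record_asts ≠ []
instance (record_asts : List String) : Decidable (Pre_is_same_str record_asts) := by unfold Pre_is_same_str; infer_instance
def pvWitness_is_same_str : List String := ["a", "a"]

def Spec_is_same_str (record_asts : List String) (out : Bool) : Prop := out = is_same_str_alt record_asts
instance (record_asts : List String) (out : Bool) : Decidable (Spec_is_same_str record_asts out) := by unfold Spec_is_same_str; infer_instance

-- ===== CLAIM (what is proved, stated in full; the proofs are below) =====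
def Claim_equal_is_same_str : Prop := ∀ (record_asts : List String), Dom_is_same_str record_asts → Pre_is_same_str record_asts → Spec_is_same_str record_asts (is_same_str record_asts)

-- ===== LEMMAS AND PROOFS =====

theorem loop_eq_all (h : String) (t : List String) :
    isSameStrLoop h t = true ↔ ∀ a ∈ t, a = h := by
  induction t with
  | nil => simp [isSameStrLoop]
  | cons a rest ih =>
    by_cases hx : h = a
    · subst hx
      simp [isSameStrLoop, ih]
    · have hb : (h != a) = true := bne_iff_ne.mpr hx
      simp only [isSameStrLoop, hb, if_true]
      constructor
      · intro hf; exact absurd hf (by simp)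
      · intro hall; exact absurd (hall a (by simp)).symm hx

theorem foldl_add_same (h : String) (t : List String) (hall : ∀ a ∈ t, a = h) :
    t.foldl PySem.Set.add [h] = [h] := by
  induction t with
  | nil => rfl
  | cons a rest ih =>
    have ha : a = h := hall a (by simp)
    subst ha
    simp only [List.foldl_cons, PySem.Set.add, PySem.Set.contains]
    simp only [List.contains_cons, beq_self_eq_true, Bool.true_or, if_true]
    exact ih (fun x hx => hall x (by simp [hx]))

theorem ofList_cons_same (h : String) (t : List String) (hall : ∀ a ∈ t, a = h) :
    PySem.Set.ofList (h :: t) = [h] := by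
  show (h :: t).foldl PySem.Set.add [] = [h]
  simp only [List.foldl_cons]
  have hadd : PySem.Set.add [] h = [h] := rfl
  rw [hadd]
  exact foldl_add_same h t hall

theorem length_ge_two_of_two_mem {α : Type} {l : List α} {a b : α}
    (ha : a ∈ l) (hb : b ∈ l) (hne : a ≠ b) : 2 ≤ l.length := by
  match l with
  | [] => simp at ha
  | [x] =>
    simp at ha hb
    exact absurd (ha.trans hb.symm) hne
  | _ :: _ :: _ => simp

theorem alt_eq_all (h : String) (t : List String) :
    is_same_str_alt (h :: t) = true ↔ ∀ a ∈ t, a = h := by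
  constructor
  · intro halt
    by_contra hnot
    push Not at hnot
    obtain ⟨a, hat, hane⟩ := hnot
    simp only [is_same_str_alt, PySem.Set.len, List.map_id', beq_iff_eq] at halt
    have hlen1 : (PySem.Set.ofList (h :: t)).length = 1 := by exact_mod_cast halt
    have ha : a ∈ PySem.Set.ofList (h :: t) := by
      rw [PySem.Set.mem_ofList]; simp [hat]
    have hh : h ∈ PySem.Set.ofList (h :: t) := by
      rw [PySem.Set.mem_ofList]; simp
    have h2 := length_ge_two_of_two_mem ha hh hane
    omega
  · intro hall
    simp [is_same_str_alt, PySem.Set.len, List.map_id', ofList_cons_same h t hall]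

-- ===== VERDICT (by name: the statement is the Claim_ definition above) =====
theorem is_same_str_spec : Claim_equal_is_same_str := by
  intro record_asts _ hpre
  unfold Spec_is_same_str
  match record_asts with
  | [] => exact absurd rfl hpre
  | h :: t =>
    by_cases ht : t = []
    · subst ht
      simp [is_same_str, is_same_str_alt, PySem.Set.ofList, PySem.Set.add,
        PySem.Set.contains, PySem.Set.len]
    · have hlen : ((h :: t).length == 1) = false := by
        cases t with
        | nil => exact absurd rfl ht
        | cons _ _ => simp
      simp only [is_same_str, hlen, Bool.false_eq_true, if_false]
      rcases hb : is_same_str_alt (h :: t) with _ | _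
      · by_contra hc
        simp only [Bool.not_eq_false] at hc
        have h1 := (loop_eq_all h t).mp hc
        have h2 := (alt_eq_all h t).mpr h1
        rw [hb] at h2; exact Bool.false_ne_true h2
      · exact (loop_eq_all h t).mpr ((alt_eq_all h t).mp hb)
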